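-- pv_equiv track=rewrite | github.com/andures/qAeroChart | qAeroChart/scripts/table_gs_rod.py | _classify_rows
-- ===== SOURCE A (Python) =====
-- def _classify_rows(table_rows: list[list[str]]) -> list[str]:
--     """Classify each row as 'title', 'header', 'data', or 'footer'."""
--     header_idx = None
--     for i, row in enumerate(table_rows):
--         if len(row) > 2 and any(row[j] for j in range(2, len(row))):
--             header_idx = i
--             break
--     types = []
--     for i, row in enumerate(table_rows):
--         is_span = len(row) > 1 and all(c == "" for c in row[1:])
--         if is_span:
--             types.append("footer" if header_idx is not None and i > header_idx else "title")
--         elif i == header_idx: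
--             types.append("header")
--         else:
--             types.append("data")
--     return types
-- ===== SOURCE B (Python) =====
-- def _classify_rows(table_rows: list[list[str]]) -> list[str]:
--     """Classify each row as 'title', 'header', 'data', or 'footer' in one pass."""
--     types = []
--     header_found = False
--     for row in table_rows:
--         if len(row) > 1 and all(c == "" for c in row[1:]):
--             types.append("footer" if header_found else "title")
--         elif not header_found and len(row) > 2 and any(row[2:]):
--             header_found = True
--             types.append("header")
--         else:
--             types.append("data")
--     return types
-- ===== Notes on version B (the rewrite author's own statement) =====
-- stated objective: simpler
-- what changed: Replaces A's two passes (a search for the header index, then a second indexed classification pass) by a single left-to-right pass maintaining a header_found flag and no indices.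
import Mathlib
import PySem

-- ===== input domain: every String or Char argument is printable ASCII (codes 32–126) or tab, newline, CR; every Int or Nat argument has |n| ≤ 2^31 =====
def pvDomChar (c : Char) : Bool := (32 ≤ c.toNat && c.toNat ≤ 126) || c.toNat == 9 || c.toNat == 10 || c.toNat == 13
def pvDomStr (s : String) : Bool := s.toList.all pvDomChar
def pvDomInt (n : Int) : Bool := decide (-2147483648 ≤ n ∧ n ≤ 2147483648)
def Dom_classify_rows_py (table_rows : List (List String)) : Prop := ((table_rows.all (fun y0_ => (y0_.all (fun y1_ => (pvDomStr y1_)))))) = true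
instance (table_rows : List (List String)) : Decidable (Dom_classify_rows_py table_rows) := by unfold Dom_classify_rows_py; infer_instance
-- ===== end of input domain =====

-- B replaces A's two passes (find header index, then classify by index) with one flagged pass; objective: simpler.

-- ===== PORT A =====
-- len(row) > 2 and any(row[j] for j in range(2, len(row))): a string is truthy iff nonempty;
-- indexing row[j] for j in range(2, len(row)) visits exactly (row.drop 2).
def pvHeaderCond (row : List String) : Bool :=
  decide (row.length > 2) && (row.drop 2).any (fun c => c != "")

-- is_span = len(row) > 1 and all(c == "" for c in row[1:])
def pvIsSpan (row : List String) : Bool :=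
  decide (row.length > 1) && (row.drop 1).all (fun c => c == "")

-- first loop with break: returns the index of the first row satisfying pvHeaderCond
def pvHeaderIdx : List (List String) → Nat → Option Nat
  | [], _ => none
  | r :: rs, i => if pvHeaderCond r then some i else pvHeaderIdx rs (i + 1)

-- second loop: classify each row by its index against header_idx
def pvClassifyA (hidx : Option Nat) : Nat → List (List String) → List String
  | _, [] => []
  | i, r :: rs =>
    (if pvIsSpan r then
       (if (match hidx with | some j => decide (i > j) | none => false) then "footer" else "title")
     else if hidx = some i then "header"
     else "data") :: pvClassifyA hidx (i + 1) rs

def classify_rows_py (table_rows : List (List String)) : List String :=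
  pvClassifyA (pvHeaderIdx table_rows 0) 0 table_rows

-- ===== PORT B =====
def pvClassifyB : Bool → List (List String) → List String
  | _, [] => []
  | hf, r :: rs =>
    if pvIsSpan r then (if hf then "footer" else "title") :: pvClassifyB hf rs
    else if !hf && pvHeaderCond r then "header" :: pvClassifyB true rs
    else "data" :: pvClassifyB hf rs

def classify_rows_py_alt (table_rows : List (List String)) : List String :=
  pvClassifyB false table_rows

-- ===== PRECONDITION & SPEC =====
def Spec_classify_rows_py (table_rows : List (List String)) (out : List String) : Prop := out = classify_rows_py_alt table_rows
instance (table_rows : List (List String)) (out : List String) : Decidable (Spec_classify_rows_py table_rows out) := by unfold Spec_classify_rows_py; infer_instance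

-- ===== CLAIM (what is proved, stated in full; the proofs are below) =====
def Claim_equal_classify_rows_py : Prop := ∀ (table_rows : List (List String)), Dom_classify_rows_py table_rows → Spec_classify_rows_py table_rows (classify_rows_py table_rows)

-- ===== LEMMAS AND PROOFS =====

-- a header row is never a span row
theorem headerCond_not_span (r : List String) (h : pvHeaderCond r = true) : pvIsSpan r = false := by
  unfold pvHeaderCond at h
  unfold pvIsSpan
  rcases Bool.and_eq_true_iff.mp h with ⟨-, hany⟩
  rcases List.any_eq_true.mp hany with ⟨x, hx, hne⟩
  have hx1 : x ∈ r.drop 1 := by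
    have : r.drop 2 = (r.drop 1).drop 1 := by simp []
    exact (List.drop_sublist 1 (r.drop 1)).mem (this ▸ hx)
  apply Bool.and_eq_false_iff.mpr
  right
  apply List.all_eq_false.mpr
  exact ⟨x, hx1, by simpa using hne⟩

-- any index returned by pvHeaderIdx starting at i is ≥ i
theorem headerIdx_ge (rs : List (List String)) : ∀ i j, pvHeaderIdx rs i = some j → i ≤ j := by
  induction rs with
  | nil => intro i j h; simp [pvHeaderIdx] at h
  | cons r rs ih =>
    intro i j h
    unfold pvHeaderIdx at h
    by_cases hc : pvHeaderCond r = true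
    · simp [hc] at h; omega
    · simp [hc] at h
      exact Nat.le_of_succ_le (ih (i + 1) j h)

-- once the header is behind us (hidx = some j < i), A's classification is B's with hf = true
theorem classifyA_after (rs : List (List String)) : ∀ i j, j < i →
    pvClassifyA (some j) i rs = pvClassifyB true rs := by
  induction rs with
  | nil => intro i j _; rfl
  | cons r rs ih =>
    intro i j hji
    unfold pvClassifyA pvClassifyB
    have h1 : decide (i > j) = true := by simpa using hji
    have h2 : (some j = some i) = False := by simp; omega
    by_cases hs : pvIsSpan r = true
    · simp [hs, h1, ih (i + 1) j (Nat.lt_succ_of_lt hji)]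
    · simp [hs, h2, ih (i + 1) j (Nat.lt_succ_of_lt hji)]

-- main invariant: before the header is found, A with hidx computed from position i equals B with hf = false
theorem classifyA_eq_B (rs : List (List String)) : ∀ i,
    pvClassifyA (pvHeaderIdx rs i) i rs = pvClassifyB false rs := by
  induction rs with
  | nil => intro i; rfl
  | cons r rs ih =>
    intro i
    unfold pvHeaderIdx pvClassifyA pvClassifyB
    by_cases hc : pvHeaderCond r = true
    · have hs := headerCond_not_span r hc
      simp [hc, hs, classifyA_after rs (i + 1) i (Nat.lt_succ_self i)]
    · simp only [hc, Bool.not_false, Bool.true_and]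
      by_cases hs : pvIsSpan r = true
      · have htitle : (match pvHeaderIdx rs (i + 1) with
            | some j => decide (i > j) | none => false) = false := by
          cases h : pvHeaderIdx rs (i + 1) with
          | none => rfl
          | some j =>
            have := headerIdx_ge rs (i + 1) j h
            simp; omega
        have hnext : ∀ j, pvHeaderIdx rs (i+1) = some j → ¬ (j = i) := by
          intro j h; have := headerIdx_ge rs (i + 1) j h; omega
        have hne : ¬ (pvHeaderIdx rs (i + 1) = some i) := by
          cases h : pvHeaderIdx rs (i + 1) with
          | none => simp
          | some j => simpa [h] using hnext j h
        simp [hs, htitle, ih (i + 1)]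
      · have hne : ¬ (pvHeaderIdx rs (i + 1) = some i) := by
          cases h : pvHeaderIdx rs (i + 1) with
          | none => simp
          | some j =>
            have := headerIdx_ge rs (i + 1) j h
            simp; omega
        simp [hs, hne, ih (i + 1)]

-- ===== VERDICT (by name: the statement is the Claim_ definition above) =====
theorem classify_rows_py_spec : Claim_equal_classify_rows_py := by
  intro rows _
  unfold Spec_classify_rows_py classify_rows_py classify_rows_py_alt
  exact classifyA_eq_B rows 0
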